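-- pv_equiv track=rewrite | github.com/TheoDlmz/AxisRules | axis/bruteforce.py | circular_ballot_completion
-- ===== SOURCE A (Python) =====
-- def find_min(axis, ballots):
--     for i in range(len(axis)):
--         if ballots[axis[i]]:
--             return i
--     return -1
--
-- def find_max(axis, ballots):
--     for i in range(len(axis)):
--         if ballots[axis[len(axis)-1-i]]:
--             return len(axis)-1-i
--     return -1
--
-- def circular_ballot_completion(axis, ballots, current_min=None):
--     c_large = 0
--     n_cand = len(axis)
--     for ball in ballots:
--         n = ball[-1]
--         app = ball[-2]
--         min_v = find_min(axis, ball[:-2])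
--         max_v = find_max(axis, ball[:-2])
--         min_fill = (max_v-min_v+1-app)
--         for i in range(min_v+1, max_v+1):
--             if ball[axis[i]]:
--                 max_v = min_v
--                 min_v = i
--                 min_fill = min(min_fill, (max_v+n_cand-min_v+1-app))
--         c_large += min_fill*n
--
--         if current_min is not None and c_large > current_min:
--             return c_large, False
--     return c_large, True
-- ===== SOURCE B (Python) =====
-- def circular_ballot_completion(axis, ballots, current_min=None):
--     c_large = 0
--     n_cand = len(axis)
--     for ball in ballots:
--         n = ball[-1]
--         app = ball[-2]
--         pos = [i for i in range(n_cand) if ball[axis[i]]]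
--         if not pos:
--             min_fill = 1 - app
--         else:
--             max_gap = pos[0] + n_cand - pos[-1] - 1
--             for a, b in zip(pos, pos[1:]):
--                 max_gap = max(max_gap, b - a - 1)
--             min_fill = n_cand - max_gap - app
--         c_large += min_fill * n
--         if current_min is not None and c_large > current_min:
--             return c_large, False
--     return c_large, True
-- ===== Notes on version B (the rewrite author's own statement) =====
-- stated objective: simpler
-- what changed: Replaces A's find_min/find_max scans plus a stateful rotation loop carrying (min_v,max_v,min_fill) by collecting each ballot's present axis positions once and computing the fill as n_cand minus the largest circular gap of absent positions.
-- outside the precondition, e.g. on circular_ballot_completion([-1, 0], [[1, 0, 9, 3]], None): A returns (-24, True), B returns (-21, True)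
import Mathlib
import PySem

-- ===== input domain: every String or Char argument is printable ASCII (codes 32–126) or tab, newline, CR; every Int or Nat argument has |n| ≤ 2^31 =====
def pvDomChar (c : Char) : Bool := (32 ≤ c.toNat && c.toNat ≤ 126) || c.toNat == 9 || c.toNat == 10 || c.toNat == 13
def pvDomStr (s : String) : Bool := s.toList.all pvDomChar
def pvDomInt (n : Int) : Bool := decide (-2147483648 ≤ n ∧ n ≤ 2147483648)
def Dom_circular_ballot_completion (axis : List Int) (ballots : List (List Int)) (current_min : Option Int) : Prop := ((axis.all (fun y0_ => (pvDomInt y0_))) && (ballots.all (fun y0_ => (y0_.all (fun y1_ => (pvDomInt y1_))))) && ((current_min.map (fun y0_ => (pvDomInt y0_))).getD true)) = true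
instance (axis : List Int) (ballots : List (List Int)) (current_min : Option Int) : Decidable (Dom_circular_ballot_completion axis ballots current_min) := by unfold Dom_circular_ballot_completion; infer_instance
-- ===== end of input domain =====

-- B replaces A's find_min/find_max scans and stateful rotation loop by the list of present
-- axis positions and the largest circular gap of absent positions (objective: simpler).

-- ===== PORT A =====
-- for i in range(len(axis)): if ballots[axis[i]]: return i;  return -1
def pvFindMinGo (axis ballots : List Int) (i : Nat) : Int :=
  if _h : i < axis.length then
    if PySem.List.pyGetD ballots (PySem.List.pyGetD axis (i : Int) 0) 0 ≠ 0 then (i : Int)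
    else pvFindMinGo axis ballots (i + 1)
  else -1
termination_by axis.length - i

def pvFindMin (axis ballots : List Int) : Int := pvFindMinGo axis ballots 0

-- for i in range(len(axis)): if ballots[axis[len(axis)-1-i]]: return len(axis)-1-i;  return -1
def pvFindMaxGo (axis ballots : List Int) (i : Nat) : Int :=
  if _h : i < axis.length then
    if PySem.List.pyGetD ballots (PySem.List.pyGetD axis ((axis.length : Int) - 1 - i) 0) 0 ≠ 0 then
      (axis.length : Int) - 1 - i
    else pvFindMaxGo axis ballots (i + 1)
  else -1
termination_by axis.length - i

def pvFindMax (axis ballots : List Int) : Int := pvFindMaxGo axis ballots 0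

-- A's per-ballot min_fill: scans + rotation loop over range(min_v+1, max_v+1)
def pvBallA (axis ball : List Int) : Int :=
  let n_cand : Int := axis.length
  let app := PySem.List.pyGetD ball (-2) 0
  let core := PySem.List.slice ball none (some (-2))     -- ball[:-2]
  let min_v := pvFindMin axis core
  let max_v := pvFindMax axis core
  let min_fill := max_v - min_v + 1 - app
  let s := (PySem.List.pyRange (min_v + 1) (max_v + 1) 1).foldl
    (fun s i =>
      if PySem.List.pyGetD ball (PySem.List.pyGetD axis i 0) 0 ≠ 0 then
        let max_v' := s.1
        let min_v' := i
        (min_v', max_v', min s.2.2 (max_v' + n_cand - min_v' + 1 - app))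
      else s)
    (min_v, max_v, min_fill)
  s.2.2

def pvLoopA (axis : List Int) (current_min : Option Int) :
    List (List Int) → Int → Int × Bool
  | [], c => (c, true)
  | ball :: rest, c =>
    let n := PySem.List.pyGetD ball (-1) 0
    let c' := c + pvBallA axis ball * n
    if (match current_min with | some m => decide (c' > m) | none => false) = true then (c', false)
    else pvLoopA axis current_min rest c'

def circular_ballot_completion (axis : List Int) (ballots : List (List Int)) (current_min : Option Int) : Int × Bool :=
  pvLoopA axis current_min ballots 0

-- ===== PORT B =====
-- B's per-ballot min_fill: present positions, then largest circular gap
def pvBallB (axis ball : List Int) : Int :=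
  let n_cand : Int := axis.length
  let app := PySem.List.pyGetD ball (-2) 0
  let pos := (PySem.List.pyRange 0 n_cand 1).filter
      (fun i => decide (PySem.List.pyGetD ball (PySem.List.pyGetD axis i 0) 0 ≠ 0))
  match pos with
  | [] => 1 - app
  | p0 :: _ =>
    let maxGap0 := p0 + n_cand - PySem.List.pyGetD pos (-1) 0 - 1
    let maxGap := (pos.zip pos.tail).foldl (fun g q => max g (q.2 - q.1 - 1)) maxGap0
    n_cand - maxGap - app

def pvLoopB (axis : List Int) (current_min : Option Int) :
    List (List Int) → Int → Int × Bool
  | [], c => (c, true)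
  | ball :: rest, c =>
    let n := PySem.List.pyGetD ball (-1) 0
    let c' := c + pvBallB axis ball * n
    if (match current_min with | some m => decide (c' > m) | none => false) = true then (c', false)
    else pvLoopB axis current_min rest c'

def circular_ballot_completion_alt (axis : List Int) (ballots : List (List Int)) (current_min : Option Int) : Int × Bool :=
  pvLoopB axis current_min ballots 0

-- ===== PRECONDITION & SPEC =====
-- Pre_ keeps the natural domain: every ballot carries its two trailing bookkeeping entries and
-- every axis entry is a nonnegative in-range candidate index. Out-of-range indices make A raise
-- IndexError; negative in-range indices are excluded because A reads them through two different
-- windows (ball[:-2] in the scans, ball in the inner loop), an artefact no caller relies on.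
def Pre_circular_ballot_completion (axis : List Int) (ballots : List (List Int)) (current_min : Option Int) : Prop :=
  ∀ ball ∈ ballots, 2 ≤ ball.length ∧ ∀ a ∈ axis, 0 ≤ a ∧ a < (ball.length : Int) - 2
instance (axis : List Int) (ballots : List (List Int)) (current_min : Option Int) : Decidable (Pre_circular_ballot_completion axis ballots current_min) := by unfold Pre_circular_ballot_completion; infer_instance

def pvWitness_circular_ballot_completion : List Int × List (List Int) × Option Int :=
  ([0, 2, 1], [[1, 0, 0, 2, 3], [0, 0, 1, 1, 2]], some 20)

def Spec_circular_ballot_completion (axis : List Int) (ballots : List (List Int)) (current_min : Option Int) (out : Int × Bool) : Prop := out = circular_ballot_completion_alt axis ballots current_min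
instance (axis : List Int) (ballots : List (List Int)) (current_min : Option Int) (out : Int × Bool) : Decidable (Spec_circular_ballot_completion axis ballots current_min out) := by unfold Spec_circular_ballot_completion; infer_instance

-- ===== CLAIM (what is proved, stated in full; the proofs are below) =====
def Claim_equal_circular_ballot_completion : Prop := ∀ (axis : List Int) (ballots : List (List Int)) (current_min : Option Int), Dom_circular_ballot_completion axis ballots current_min → Pre_circular_ballot_completion axis ballots current_min → Spec_circular_ballot_completion axis ballots current_min (circular_ballot_completion axis ballots current_min)

-- ===== LEMMAS AND PROOFS =====

-- find_min's left-to-right scan returns the head of the filtered index range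
theorem findMinGo_eq (axis ballots : List Int) :
    ∀ (k j : Nat), axis.length - j = k →
    pvFindMinGo axis ballots j =
      ((PySem.List.pyRange (j : Int) (axis.length : Int) 1).filter
        (fun i => decide (PySem.List.pyGetD ballots (PySem.List.pyGetD axis i 0) 0 ≠ 0))).headD (-1) := by
  intro k
  induction k with
  | zero =>
    intro j hj
    have h : ¬ j < axis.length := by omega
    rw [pvFindMinGo, dif_neg h,
      PySem.List.pyRange_one_eq_nil (by exact_mod_cast Nat.le_of_not_lt h)]
    rfl
  | succ k ih =>
    intro j hj
    have h : j < axis.length := by omega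
    rw [pvFindMinGo, dif_pos h,
      PySem.List.pyRange_one_cons (by exact_mod_cast h), List.filter_cons]
    by_cases hp0 : PySem.List.pyGetD ballots (PySem.List.pyGetD axis (j : Int) 0) 0 = 0
    · have hp0' : PySem.List.pyGetD ballots (axis[j]?.getD 0) 0 = 0 := by simpa using hp0
      simpa [hp0'] using ih (j + 1) (by omega)
    · have hp0' : ¬ PySem.List.pyGetD ballots (axis[j]?.getD 0) 0 = 0 := by simpa using hp0
      simp [hp0']

-- find_max's right-to-left scan returns the last element of the filtered index range
theorem findMaxGo_eq (axis ballots : List Int) :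
    ∀ (k j : Nat), axis.length - j = k → j ≤ axis.length →
    pvFindMaxGo axis ballots j =
      ((PySem.List.pyRange 0 ((axis.length : Int) - (j : Int)) 1).filter
        (fun i => decide (PySem.List.pyGetD ballots (PySem.List.pyGetD axis i 0) 0 ≠ 0))).getLastD (-1) := by
  intro k
  induction k with
  | zero =>
    intro j hj hjle
    have h : ¬ j < axis.length := by omega
    rw [pvFindMaxGo, dif_neg h, PySem.List.pyRange_one_eq_nil (by
      have : axis.length = j := by omega
      simp [this])]
    rfl
  | succ k ih =>
    intro j hj hjle
    have h : j < axis.length := by omega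
    have hsplit : (axis.length : Int) - (j : Int) = ((axis.length : Int) - ((j:Int) + 1)) + 1 := by ring
    have hidx : (axis.length : Int) - 1 - (j : Int) = (axis.length : Int) - ((j:Int) + 1) := by ring
    rw [pvFindMaxGo, dif_pos h, hsplit,
      PySem.List.pyRange_one_succ_right (by
        have : (j:Int) + 1 ≤ (axis.length : Int) := by exact_mod_cast h
        omega),
      List.filter_append, hidx]
    by_cases hp0 : PySem.List.pyGetD ballots (PySem.List.pyGetD axis ((axis.length : Int) - ((j:Int) + 1)) 0) 0 = 0
    · simpa [hp0] using ih (j + 1) (by omega) (by omega)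
    · simp [hp0]

-- under Pre_, reading a candidate through ball[:-2] and through ball is the same
theorem pred_core_eq (axis ball : List Int) (h2 : 2 ≤ ball.length)
    (hax : ∀ a ∈ axis, 0 ≤ a ∧ a < (ball.length : Int) - 2)
    (i : Int) (h0 : 0 ≤ i) (hi : i < (axis.length : Int)) :
    PySem.List.pyGetD (PySem.List.slice ball none (some (-2))) (PySem.List.pyGetD axis i 0) 0
      = PySem.List.pyGetD ball (PySem.List.pyGetD axis i 0) 0 := by
  have hmem : PySem.List.pyGetD axis i 0 ∈ axis :=
    PySem.List.pyGetD_mem axis 0 ⟨by omega, hi⟩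
  obtain ⟨ha0, ha⟩ := hax _ hmem
  rw [PySem.List.slice_to_neg_ofNat ball 2 (by omega)]
  have hlen : (List.take (ball.length - 2) ball).length = ball.length - 2 := by
    simp [List.length_take]
  rw [PySem.List.pyGetD_eq_getElem _ _ ha0 (by rw [hlen]; omega),
      PySem.List.pyGetD_eq_getElem _ _ ha0 (by omega)]
  exact List.getElem_take

-- on a strictly increasing list, getLastD bounds every element
theorem mem_le_getLastD :
    ∀ (l : List Int), l.Pairwise (· < ·) → ∀ x ∈ l, ∀ d, x ≤ l.getLastD d := by
  intro l
  induction l with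
  | nil => simp
  | cons a t ih =>
    intro hp x hx d
    rcases List.mem_cons.mp hx with rfl | hxt
    · cases t with
      | nil => simp
      | cons b t' =>
        have hmem : (b :: t').getLast (by simp) ∈ b :: t' := List.getLast_mem _
        have hlt := (List.pairwise_cons.mp hp).1 _ hmem
        calc x ≤ (b :: t').getLast (by simp) := le_of_lt hlt
          _ = t'.getLastD b := by rw [List.getLast_eq_getLastD]
          _ = (x :: b :: t').getLastD d := by simp [List.getLast?_cons]
    · have := ih (List.pairwise_cons.mp hp).2 x hxt
      cases t with
      | nil => simp at hxt
      | cons b t' =>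
        calc x ≤ (b :: t').getLastD a := this a
          _ = (a :: b :: t').getLastD d := by simp [List.getLast?_cons]

-- A's rotation loop computes n − (running max gap) − app
theorem foldMinMax (n app : Int) :
    ∀ (rest : List Int) (prev mx mf g : Int), mf = n - g - app →
      ((rest.foldl (fun s i => (i, s.1, min s.2.2 (s.1 + n - i + 1 - app)))
          ((prev, mx, mf) : Int × Int × Int)).2.2)
        = n - (((prev :: rest).zip rest).foldl (fun g q => max g (q.2 - q.1 - 1)) g) - app := by
  intro rest
  induction rest with
  | nil => intro prev mx mf g h; simpa using h
  | cons r rs ih =>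
    intro prev mx mf g h
    simp only [List.foldl_cons, List.zip_cons_cons]
    exact ih r prev _ _ (by omega)

-- per-ballot agreement of the two computations
theorem ballAB (axis ball : List Int) (h2 : 2 ≤ ball.length)
    (hax : ∀ a ∈ axis, 0 ≤ a ∧ a < (ball.length : Int) - 2) :
    pvBallA axis ball = pvBallB axis ball := by
  have hfc : ∀ i ∈ PySem.List.pyRange 0 ((axis.length : Int)) 1,
      (decide (PySem.List.pyGetD (PySem.List.slice ball none (some (-2))) (PySem.List.pyGetD axis i 0) 0 ≠ 0))
        = (decide (PySem.List.pyGetD ball (PySem.List.pyGetD axis i 0) 0 ≠ 0)) := by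
    intro i hi
    obtain ⟨h0, h1⟩ := PySem.List.mem_pyRange_one.mp hi
    rw [pred_core_eq axis ball h2 hax i h0 h1]
  have hmin : pvFindMin axis (PySem.List.slice ball none (some (-2)))
      = ((PySem.List.pyRange 0 ((axis.length : Int)) 1).filter
          (fun i => decide (PySem.List.pyGetD ball (PySem.List.pyGetD axis i 0) 0 ≠ 0))).headD (-1) := by
    rw [pvFindMin, findMinGo_eq axis _ axis.length 0 (by omega)]
    simp only [Nat.cast_zero]
    rw [List.filter_congr hfc]
  have hmax : pvFindMax axis (PySem.List.slice ball none (some (-2)))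
      = ((PySem.List.pyRange 0 ((axis.length : Int)) 1).filter
          (fun i => decide (PySem.List.pyGetD ball (PySem.List.pyGetD axis i 0) 0 ≠ 0))).getLastD (-1) := by
    rw [pvFindMax, findMaxGo_eq axis _ axis.length 0 (by omega) (by omega)]
    simp only [Nat.cast_zero, sub_zero]
    rw [List.filter_congr hfc]
  have hsorted : ((PySem.List.pyRange 0 ((axis.length : Int)) 1).filter
      (fun i => decide (PySem.List.pyGetD ball (PySem.List.pyGetD axis i 0) 0 ≠ 0))).Pairwise (· < ·) :=
    (PySem.List.pairwise_lt_pyRange_one 0 _).filter _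
  simp only [pvBallA, pvBallB]
  rw [hmin, hmax, PySem.List.foldl_ite_eq_foldl_filter
      (fun i => PySem.List.pyGetD ball (PySem.List.pyGetD axis i 0) 0 ≠ 0)
      (fun s i => (i, s.1, min s.2.2 (s.1 + (axis.length : Int) - i + 1 - PySem.List.pyGetD ball (-2) 0)))]
  rcases hposeq : (PySem.List.pyRange 0 ((axis.length : Int)) 1).filter
      (fun i => decide (PySem.List.pyGetD ball (PySem.List.pyGetD axis i 0) 0 ≠ 0)) with _ | ⟨p0, rest⟩
  · rw [show PySem.List.pyRange (List.headD ([] : List Int) (-1) + 1) (List.getLastD ([] : List Int) (-1) + 1) 1 = []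
        from PySem.List.pyRange_one_eq_nil (by simp)]
    simp
  · rw [hposeq] at hsorted
    have hposmem : ∀ x ∈ p0 :: rest, (0 ≤ x ∧ x < (axis.length : Int)) := by
      intro x hx
      rw [← hposeq] at hx
      exact PySem.List.mem_pyRange_one.mp (List.mem_filter.mp hx).1
    have hppos : ∀ x ∈ p0 :: rest,
        (decide (PySem.List.pyGetD ball (PySem.List.pyGetD axis x 0) 0 ≠ 0)) = true := by
      intro x hx
      rw [← hposeq] at hx
      exact (List.mem_filter.mp hx).2
    have hpk_eq : (p0 :: rest).getLastD (-1) = rest.getLastD p0 := by simp [List.getLast?_cons]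
    have hpkmem : rest.getLastD p0 ∈ p0 :: rest := by
      rw [← List.getLast_eq_getLastD (l := rest) (a := p0) (by simp)]
      exact List.getLast_mem _
    obtain ⟨hp00, hp0n⟩ := hposmem p0 List.mem_cons_self
    obtain ⟨hpk0, hpkn⟩ := hposmem _ hpkmem
    have hp0pk : p0 ≤ rest.getLastD p0 := by
      have := mem_le_getLastD (p0 :: rest) hsorted p0 List.mem_cons_self (-1)
      rwa [hpk_eq] at this
    -- rest is exactly the present positions strictly between p0 and the last one
    have hrest : rest = (PySem.List.pyRange (p0 + 1) (rest.getLastD p0 + 1) 1).filter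
        (fun i => decide (PySem.List.pyGetD ball (PySem.List.pyGetD axis i 0) 0 ≠ 0)) := by
      have h1 : PySem.List.pyRange 0 ((axis.length : Int)) 1
          = PySem.List.pyRange 0 (p0 + 1) 1 ++ PySem.List.pyRange (p0 + 1) ((axis.length : Int)) 1 :=
        PySem.List.pyRange_one_append 0 (p0 + 1) _ (by omega) (by omega)
      have h2 : PySem.List.pyRange (p0 + 1) ((axis.length : Int)) 1
          = PySem.List.pyRange (p0 + 1) (rest.getLastD p0 + 1) 1
            ++ PySem.List.pyRange (rest.getLastD p0 + 1) ((axis.length : Int)) 1 :=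
        PySem.List.pyRange_one_append _ (rest.getLastD p0 + 1) _ (by omega) (by omega)
      have hleft : (PySem.List.pyRange 0 (p0 + 1) 1).filter
          (fun i => decide (PySem.List.pyGetD ball (PySem.List.pyGetD axis i 0) 0 ≠ 0)) = [p0] := by
        rw [PySem.List.pyRange_one_succ_right (by omega), List.filter_append]
        have hnil : (PySem.List.pyRange 0 p0 1).filter
            (fun i => decide (PySem.List.pyGetD ball (PySem.List.pyGetD axis i 0) 0 ≠ 0)) = [] := by
          apply List.filter_eq_nil_iff.mpr
          intro x hx hpx
          obtain ⟨hx0, hxp0⟩ := PySem.List.mem_pyRange_one.mp hx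
          have hxpos : x ∈ p0 :: rest := by
            rw [← hposeq]
            exact List.mem_filter.mpr ⟨PySem.List.mem_pyRange_one.mpr ⟨hx0, by omega⟩, hpx⟩
          rcases List.mem_cons.mp hxpos with rfl | hxr
          · omega
          · have := (List.pairwise_cons.mp hsorted).1 x hxr
            omega
        rw [hnil]
        simp [of_decide_eq_true (hppos p0 List.mem_cons_self)]
      have hright : (PySem.List.pyRange (rest.getLastD p0 + 1) ((axis.length : Int)) 1).filter
          (fun i => decide (PySem.List.pyGetD ball (PySem.List.pyGetD axis i 0) 0 ≠ 0)) = [] := by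
        apply List.filter_eq_nil_iff.mpr
        intro x hx hpx
        obtain ⟨hx0, hxn⟩ := PySem.List.mem_pyRange_one.mp hx
        have hxpos : x ∈ p0 :: rest := by
          rw [← hposeq]
          exact List.mem_filter.mpr ⟨PySem.List.mem_pyRange_one.mpr ⟨by omega, hxn⟩, hpx⟩
        have := mem_le_getLastD (p0 :: rest) hsorted x hxpos (-1)
        rw [hpk_eq] at this
        omega
      have hcat : p0 :: rest
          = [p0] ++ ((PySem.List.pyRange (p0 + 1) (rest.getLastD p0 + 1) 1).filter
              (fun i => decide (PySem.List.pyGetD ball (PySem.List.pyGetD axis i 0) 0 ≠ 0)) ++ []) := by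
        rw [← hposeq, h1, h2, List.filter_append, List.filter_append, hleft, hright]
      simpa using hcat
    simp only [List.headD_cons, hpk_eq]
    rw [← hrest]
    rw [foldMinMax (axis.length : Int) (PySem.List.pyGetD ball (-2) 0) rest p0 (rest.getLastD p0)
        _ (p0 + (axis.length : Int) - rest.getLastD p0 - 1) (by ring)]
    have hneg1 : PySem.List.pyGetD (p0 :: rest) (-1) 0 = rest.getLastD p0 := by
      rw [PySem.List.pyGetD_neg_one (p0 :: rest) 0 (by simp), List.getLast_eq_getLastD]
    rw [hneg1]
    rfl

-- the outer early-exit loops agree once the per-ballot values agree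
theorem loopAB (axis : List Int) (cm : Option Int) :
    ∀ (bs : List (List Int)), (∀ ball ∈ bs, pvBallA axis ball = pvBallB axis ball) →
      ∀ c, pvLoopA axis cm bs c = pvLoopB axis cm bs c := by
  intro bs
  induction bs with
  | nil => intro _ c; rfl
  | cons b t ih =>
    intro h c
    simp only [pvLoopA, pvLoopB, h b List.mem_cons_self]
    split_ifs <;>
      first
        | rfl
        | exact ih (fun ball hb => h ball (List.mem_cons_of_mem b hb)) _

theorem circular_ballot_completion_spec : Claim_equal_circular_ballot_completion := by
  intro axis ballots current_min _ hpre
  unfold Spec_circular_ballot_completion circular_ballot_completion circular_ballot_completion_alt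
  exact loopAB axis current_min ballots
    (fun ball hb => ballAB axis ball (hpre ball hb).1 (hpre ball hb).2) 0
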